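-- pv_equiv track=rewrite | github.com/ekolzzz/BigData | Python/0-basic/homework/day05/test01.py | my_task
-- ===== SOURCE A (Python) =====
-- def my_task(num, com):
--     i = 0
--     list = []
--
--      #如果命令为True,则输出偶数
--     while i <= num :
--         if com:  # 返回偶数
--             if i % 2 == 0:
--                 list.append(i)
--         else:  # 返回奇数
--             if i % 2 != 0:
--                 list.append(i)
--         i += 1
--
--     return list
-- ===== SOURCE B (Python) =====
-- def my_task(num, com):
--     start = 0 if com else 1
--     return list(range(start, num + 1, 2))
-- ===== Notes on version B (the rewrite author's own statement) =====
-- stated objective: faster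
-- what changed: Replaces the scan over every integer 0..num with a parity test by a direct stride-2 range starting at 0 (even) or 1 (odd), generating only the wanted numbers.
import Mathlib
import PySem

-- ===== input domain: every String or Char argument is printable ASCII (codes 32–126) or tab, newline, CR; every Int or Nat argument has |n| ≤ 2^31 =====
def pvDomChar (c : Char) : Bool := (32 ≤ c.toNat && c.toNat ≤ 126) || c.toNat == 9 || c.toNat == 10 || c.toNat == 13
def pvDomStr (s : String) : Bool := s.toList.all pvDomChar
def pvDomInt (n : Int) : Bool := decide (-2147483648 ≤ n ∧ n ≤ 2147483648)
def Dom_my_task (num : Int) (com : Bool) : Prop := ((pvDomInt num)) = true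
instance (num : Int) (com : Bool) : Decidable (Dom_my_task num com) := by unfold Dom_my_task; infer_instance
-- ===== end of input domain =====

-- B replaces A's scan over every integer 0..num with a parity filter by a
-- direct stride-2 range starting at 0 (even) or 1 (odd): generates only the
-- wanted numbers (objective: faster by a constant factor).

-- ===== PORT A =====
-- the while-loop of A: i counts up from 0; list accumulates the matching numbers
def myTaskLoop (num : Int) (com : Bool) (i : Int) (acc : List Int) : List Int :=
  if i ≤ num then
    myTaskLoop num com (i + 1)
      (if com then (if i % 2 == 0 then acc ++ [i] else acc)
       else (if i % 2 != 0 then acc ++ [i] else acc))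
  else acc
termination_by (num + 1 - i).toNat
decreasing_by omega

def my_task (num : Int) (com : Bool) : List Int :=
  myTaskLoop num com 0 []

-- ===== PORT B =====
def my_task_alt (num : Int) (com : Bool) : List Int :=
  PySem.List.pyRange (if com then 0 else 1) (num + 1) 2

-- ===== PRECONDITION & SPEC =====
def Spec_my_task (num : Int) (com : Bool) (out : List Int) : Prop := out = my_task_alt num com
instance (num : Int) (com : Bool) (out : List Int) : Decidable (Spec_my_task num com out) := by unfold Spec_my_task; infer_instance

-- ===== CLAIM (what is proved, stated in full; the proofs are below) =====
def Claim_equal_my_task : Prop := ∀ (num : Int) (com : Bool), Dom_my_task num com → Spec_my_task num com (my_task num com)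

-- ===== LEMMAS AND PROOFS =====

theorem pyRange_two_nil (a b : Int) (h : b ≤ a) : PySem.List.pyRange a b 2 = [] := by
  rw [PySem.List.pyRange_of_pos a b (by norm_num), if_neg (by omega)]
  simp

theorem pyRange_two_cons (a b : Int) (h : a < b) :
    PySem.List.pyRange a b 2 = a :: PySem.List.pyRange (a + 2) b 2 := by
  rw [PySem.List.pyRange_of_pos a b (by norm_num),
      PySem.List.pyRange_of_pos (a + 2) b (by norm_num), if_pos h]
  have hc : ((b - a + 2 - 1) / 2).toNat
      = (if a + 2 < b then ((b - (a + 2) + 2 - 1) / 2).toNat else 0) + 1 := by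
    split_ifs with h2 <;> omega
  rw [hc, List.range_succ_eq_map, List.map_cons, List.map_map]
  refine List.cons_eq_cons.mpr ⟨by push_cast; ring, ?_⟩
  apply List.map_congr_left
  intro k _
  simp only [Function.comp]
  push_cast
  ring

-- the loop, from any i ≥ 0, produces acc ++ the stride-2 range starting at the
-- first index ≥ i whose parity matches com
theorem loop_eq (num : Int) (com : Bool) :
    ∀ (n : Nat) (i : Int) (acc : List Int), (num + 1 - i).toNat = n →
      myTaskLoop num com i acc
        = acc ++ PySem.List.pyRange (if (i % 2 == 0) = com then i else i + 1) (num + 1) 2 := by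
  intro n
  induction n with
  | zero =>
      intro i acc hn
      have hgt : num < i := by omega
      rw [myTaskLoop, if_neg (by omega)]
      split_ifs with hm
      · rw [pyRange_two_nil _ _ (by omega)]; simp
      · rw [pyRange_two_nil _ _ (by omega)]; simp
  | succ n ih =>
      intro i acc hn
      have hle : i ≤ num := by omega
      have hpar : ((i + 1) % 2 == 0) = !(i % 2 == 0) := by
        have h2 : i % 2 = 0 ∨ i % 2 = 1 := by omega
        rcases h2 with h2 | h2
        · have h3 : (i + 1) % 2 = 1 := by omega
          simp [h2, h3]
        · have h3 : (i + 1) % 2 = 0 := by omega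
          simp [h2, h3]
      rw [myTaskLoop, if_pos hle, ih (i + 1) _ (by omega)]
      by_cases hm : (i % 2 == 0) = com
      · -- i matches: append i, next match is i + 2
        have hn2 : ¬ (((i + 1) % 2 == 0) = com) := by
          rw [hpar, ← hm]; cases (i % 2 == 0) <;> simp
        rw [if_pos hm, if_neg hn2, pyRange_two_cons i (num + 1) (by omega)]
        have hacc : (if com then (if i % 2 == 0 then acc ++ [i] else acc)
            else (if i % 2 != 0 then acc ++ [i] else acc)) = acc ++ [i] := by
          cases com <;> simp_all [bne]
        rw [hacc]
        have h12 : i + 1 + 1 = i + 2 := by ring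
        rw [h12]
        simp
      · -- i does not match: skip, next match is i + 1
        have hn2 : (((i + 1) % 2 == 0) = com) := by
          rw [hpar]; cases hcom : com <;> cases hio : (i % 2 == 0) <;> simp_all
        rw [if_neg hm, if_pos hn2]
        have hacc : (if com then (if i % 2 == 0 then acc ++ [i] else acc)
            else (if i % 2 != 0 then acc ++ [i] else acc)) = acc := by
          cases com <;> simp_all [bne]
        rw [hacc]

-- ===== VERDICT (by name: the statement is the Claim_ definition above) =====
theorem my_task_spec : Claim_equal_my_task := by
  intro num com _
  unfold Spec_my_task my_task my_task_alt
  rw [loop_eq num com (num + 1 - 0).toNat 0 [] rfl]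
  cases com <;> simp
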